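-- pv_equiv track=rewrite | github.com/lavishlyinspired/GraphDBExperiments | VER1/5.Python_ontodriven_kgraph/validate_shacl.py | parse_validation_results
-- ===== SOURCE A (Python) =====
-- def parse_validation_results(results_text):
--     """Parse and categorize validation results"""
--     violations = []
--     warnings = []
--     info = []
--
--     if not results_text or "Validation Report" not in results_text:
--         return violations, warnings, info
--
--     # Split into individual results
--     lines = results_text.split('\n')
--     current_result = []
--
--     for line in lines:
--         if line.startswith('Constraint Violation') or line.startswith('Validation Result'):
--             if current_result:
--                 result_text = '\n'.join(current_result)
--
--                 if 'Severity: sh:Violation' in result_text: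
--                     violations.append(result_text)
--                 elif 'Severity: sh:Warning' in result_text:
--                     warnings.append(result_text)
--                 elif 'Severity: sh:Info' in result_text:
--                     info.append(result_text)
--
--                 current_result = []
--
--         current_result.append(line)
--
--     # Don't forget the last one
--     if current_result:
--         result_text = '\n'.join(current_result)
--         if 'Severity: sh:Violation' in result_text:
--             violations.append(result_text)
--         elif 'Severity: sh:Warning' in result_text:
--             warnings.append(result_text)
--         elif 'Severity: sh:Info' in result_text:
--             info.append(result_text)
--
--     return violations, warnings, info
-- ===== SOURCE B (Python) =====
-- def parse_validation_results(results_text):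
--     """Parse and categorize validation results"""
--     if not results_text or "Validation Report" not in results_text:
--         return [], [], []
--
--     lines = results_text.split('\n')
--     # Block boundaries: positions (after the first line) where a new result header starts.
--     cuts = [i for i, line in enumerate(lines)
--             if i > 0 and (line.startswith('Constraint Violation')
--                           or line.startswith('Validation Result'))]
--     bounds = [0] + cuts + [len(lines)]
--     blocks = ['\n'.join(lines[a:b]) for a, b in zip(bounds, bounds[1:])]
--
--     V, W, I = 'Severity: sh:Violation', 'Severity: sh:Warning', 'Severity: sh:Info'
--     violations = [b for b in blocks if V in b]
--     warnings = [b for b in blocks if W in b and V not in b]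
--     info = [b for b in blocks if I in b and V not in b and W not in b]
--     return violations, warnings, info
-- ===== Notes on version B (the rewrite author's own statement) =====
-- stated objective: alternative
-- what changed: B replaces A's stateful accumulator loop (flushing and classifying a current block inline, with the classification duplicated after the loop) by an index-based formulation: it computes the list of cut positions, materializes the blocks as slices between consecutive cut points, and builds the three result lists as three declarative filters over the blocks.
import Mathlib
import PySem

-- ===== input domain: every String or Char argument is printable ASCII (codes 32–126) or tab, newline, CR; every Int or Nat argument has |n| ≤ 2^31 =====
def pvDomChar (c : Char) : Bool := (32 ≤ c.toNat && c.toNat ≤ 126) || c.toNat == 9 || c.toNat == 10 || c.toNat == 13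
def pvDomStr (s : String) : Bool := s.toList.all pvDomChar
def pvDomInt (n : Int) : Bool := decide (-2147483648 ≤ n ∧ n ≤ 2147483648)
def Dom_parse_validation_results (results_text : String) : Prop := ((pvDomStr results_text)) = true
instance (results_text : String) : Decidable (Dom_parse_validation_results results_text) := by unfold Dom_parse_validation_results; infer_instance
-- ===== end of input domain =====

-- B replaces A's stateful flush-and-classify accumulator loop by computing the cut positions,
-- slicing the blocks between consecutive cut points and filtering them into three lists (objective: alternative).


-- ===== PORT A =====
-- loop body of A's single pass: flush-and-categorize on a block-start line, then append the line
def pvStepA (st : (List String × List String × List String) × List String) (line : String) :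
    (List String × List String × List String) × List String :=
  let ((violations, warnings, info), current_result) := st
  if PySem.Str.startswith line "Constraint Violation" || PySem.Str.startswith line "Validation Result" then
    if current_result.isEmpty then
      ((violations, warnings, info), current_result ++ [line])
    else
      let result_text := PySem.Str.join "\n" current_result
      if PySem.Str.isIn "Severity: sh:Violation" result_text then
        ((violations ++ [result_text], warnings, info), ([] : List String) ++ [line])
      else if PySem.Str.isIn "Severity: sh:Warning" result_text then
        ((violations, warnings ++ [result_text], info), ([] : List String) ++ [line])
      else if PySem.Str.isIn "Severity: sh:Info" result_text then
        ((violations, warnings, info ++ [result_text]), ([] : List String) ++ [line])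
      else
        ((violations, warnings, info), ([] : List String) ++ [line])
  else
    ((violations, warnings, info), current_result ++ [line])

def parse_validation_results (results_text : String) : List String × List String × List String :=
  let violations : List String := []
  let warnings : List String := []
  let info : List String := []
  if PySem.Str.len results_text == 0 || !PySem.Str.isIn "Validation Report" results_text then
    (violations, warnings, info)
  else
    let lines := (PySem.Str.split? results_text "\n").getD []
    let st := lines.foldl pvStepA ((violations, warnings, info), ([] : List String))
    let ((violations, warnings, info), current_result) := st
    if current_result.isEmpty then
      (violations, warnings, info)
    else
      let result_text := PySem.Str.join "\n" current_result
      if PySem.Str.isIn "Severity: sh:Violation" result_text then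
        (violations ++ [result_text], warnings, info)
      else if PySem.Str.isIn "Severity: sh:Warning" result_text then
        (violations, warnings ++ [result_text], info)
      else if PySem.Str.isIn "Severity: sh:Info" result_text then
        (violations, warnings, info ++ [result_text])
      else
        (violations, warnings, info)

-- ===== PORT B =====
-- a line that starts a new result block
def pvIsB (line : String) : Bool :=
  PySem.Str.startswith line "Constraint Violation" || PySem.Str.startswith line "Validation Result"

def parse_validation_results_alt (results_text : String) : List String × List String × List String :=
  if PySem.Str.len results_text == 0 || !PySem.Str.isIn "Validation Report" results_text then
    ([], [], [])
  else
    let lines := (PySem.Str.split? results_text "\n").getD []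
    let cuts := ((PySem.List.enumerate lines).filter
        (fun p => decide ((0 : Int) < p.1) && pvIsB p.2)).map Prod.fst
    let bounds := (0 : Int) :: cuts ++ [(lines.length : Int)]
    let blocks := (bounds.zip (PySem.List.slice bounds (some 1) none)).map
        (fun ab => PySem.Str.join "\n" (PySem.List.slice lines (some ab.1) (some ab.2)))
    (blocks.filter (fun b => PySem.Str.isIn "Severity: sh:Violation" b),
     blocks.filter (fun b => PySem.Str.isIn "Severity: sh:Warning" b &&
        !PySem.Str.isIn "Severity: sh:Violation" b),
     blocks.filter (fun b => PySem.Str.isIn "Severity: sh:Info" b &&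
        !PySem.Str.isIn "Severity: sh:Violation" b && !PySem.Str.isIn "Severity: sh:Warning" b))

-- ===== PRECONDITION & SPEC =====
def Spec_parse_validation_results (results_text : String) (out : List String × List String × List String) : Prop := out = parse_validation_results_alt results_text
instance (results_text : String) (out : List String × List String × List String) : Decidable (Spec_parse_validation_results results_text out) := by unfold Spec_parse_validation_results; infer_instance

-- ===== CLAIM (what is proved, stated in full; the proofs are below) =====
def Claim_equal_parse_validation_results : Prop := ∀ (results_text : String), Dom_parse_validation_results results_text → Spec_parse_validation_results results_text (parse_validation_results results_text)

-- ===== LEMMAS AND PROOFS =====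

-- proof-side model of A's loop: close the current block on a block-start line, else extend it
def pvStepB (st : List String × List String) (line : String) : List String × List String :=
  if pvIsB line && !st.2.isEmpty then
    (st.1 ++ [PySem.Str.join "\n" st.2], [line])
  else
    (st.1, st.2 ++ [line])

-- proof-side: put one block into the right bucket (A's if/elif chain)
def pvCat (acc : List String × List String × List String) (block : String) :
    List String × List String × List String :=
  if PySem.Str.isIn "Severity: sh:Violation" block then
    (acc.1 ++ [block], acc.2.1, acc.2.2)
  else if PySem.Str.isIn "Severity: sh:Warning" block then
    (acc.1, acc.2.1 ++ [block], acc.2.2)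
  else if PySem.Str.isIn "Severity: sh:Info" block then
    (acc.1, acc.2.1, acc.2.2 ++ [block])
  else
    acc

-- proof-side: the blocks as lists of lines, recursively
def pvSegs : List String → List String → List (List String)
  | [], p => [p]
  | x :: xs, p => if pvIsB x then p :: pvSegs xs [x] else pvSegs xs (p ++ [x])

-- proof-side: cut positions of the remaining lines, offset k
def pvCutsI : Nat → List String → List Int
  | _, [] => []
  | k, x :: xs => if pvIsB x then ((k : Nat) : Int) :: pvCutsI (k + 1) xs else pvCutsI (k + 1) xs

-- one step of A is one step of pvStepB with the categorization pushed through
theorem pvStepA_eq (blocks : List String) (cur : List String) (line : String) :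
    pvStepA (blocks.foldl pvCat ([], [], []), cur) line =
      ((pvStepB (blocks, cur) line).1.foldl pvCat ([], [], []), (pvStepB (blocks, cur) line).2) := by
  simp only [pvStepA, pvStepB, pvIsB]
  by_cases hs : (PySem.Str.startswith line "Constraint Violation"
      || PySem.Str.startswith line "Validation Result") = true
  · rw [if_pos hs]
    by_cases he : cur.isEmpty = true
    · rw [if_pos he,
        if_neg (by rw [Bool.and_eq_true]; rintro ⟨-, h2⟩; rw [he] at h2; exact absurd h2 (by decide) :
          ¬ ((PySem.Str.startswith line "Constraint Violation"
              || PySem.Str.startswith line "Validation Result") && !cur.isEmpty) = true)]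
    · rw [if_neg he,
        if_pos (by rw [Bool.and_eq_true]
                   exact ⟨hs, by cases hcb : cur.isEmpty with
                                 | true => exact absurd hcb he
                                 | false => decide⟩ :
          ((PySem.Str.startswith line "Constraint Violation"
              || PySem.Str.startswith line "Validation Result") && !cur.isEmpty) = true)]
      simp only [List.foldl_append, List.foldl_cons, List.foldl_nil]
      unfold pvCat
      split_ifs <;> rfl
  · rw [if_neg hs,
      if_neg (by rw [Bool.and_eq_true]; rintro ⟨h1, -⟩; exact hs h1 :
        ¬ ((PySem.Str.startswith line "Constraint Violation"
            || PySem.Str.startswith line "Validation Result") && !cur.isEmpty) = true)]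

theorem pvLoop_inv (lines : List String) :
    ∀ (blocks cur : List String),
      lines.foldl pvStepA (blocks.foldl pvCat ([], [], []), cur) =
        ((lines.foldl pvStepB (blocks, cur)).1.foldl pvCat ([], [], []),
         (lines.foldl pvStepB (blocks, cur)).2) := by
  induction lines with
  | nil => intro blocks cur; rfl
  | cons l rest ih =>
    intro blocks cur
    simp only [List.foldl_cons]
    rw [pvStepA_eq]
    exact ih (pvStepB (blocks, cur) l).1 (pvStepB (blocks, cur) l).2

-- pvStepB always leaves a non-empty current block
theorem pvStepB_snd_ne (st : List String × List String) (line : String) :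
    (pvStepB st line).2 ≠ [] := by
  simp only [pvStepB]; split <;> simp

theorem pvFoldB_snd_ne (lines : List String) :
    ∀ (st : List String × List String), st.2 ≠ [] →
      (lines.foldl pvStepB st).2 ≠ [] := by
  induction lines with
  | nil => intro st h; exact h
  | cons l rest ih =>
    intro st _
    simpa using ih (pvStepB st l) (pvStepB_snd_ne st l)

theorem pvSplitOn_go_ne (sep : List Char) :
    ∀ (fuel : Nat) (l cur : List Char) (acc : List (List Char)),
      PySem.Chars.splitOn.go sep fuel l cur acc ≠ [] := by
  intro fuel
  induction fuel with
  | zero => intro l cur acc; simp [PySem.Chars.splitOn.go]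
  | succ n ih =>
    intro l cur acc
    cases l with
    | nil => simp [PySem.Chars.splitOn.go]
    | cons c rest =>
      rw [PySem.Chars.splitOn.go]
      split <;> apply ih

theorem pvLines_ne (s : String) :
    (PySem.Str.split? s "\n").getD [] ≠ [] := by
  simp only [PySem.Str.split?, PySem.Chars.split?, PySem.Chars.splitOn]
  simp only [show ("\n" : String).toList = ['\n'] from rfl]
  simp only [List.isEmpty_cons, if_neg (by decide : ¬ (false = true))]
  simp only [Option.map_some, Option.getD_some, ne_eq, List.map_eq_nil_iff]
  exact pvSplitOn_go_ne _ _ _ _ _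

-- the block list produced by A's loop is pvSegs, joined
theorem pvFoldB_blocks (lines : List String) :
    ∀ (bs p : List String), p ≠ [] →
      (lines.foldl pvStepB (bs, p)).1 ++ [PySem.Str.join "\n" (lines.foldl pvStepB (bs, p)).2] =
        bs ++ (pvSegs lines p).map (PySem.Str.join "\n") := by
  induction lines with
  | nil => intro bs p _; simp [pvSegs]
  | cons x xs ih =>
    intro bs p hp
    simp only [List.foldl_cons, pvStepB, pvSegs]
    by_cases hb : pvIsB x = true
    · have hpe : p.isEmpty = false := by
        cases p with | nil => exact absurd rfl hp | cons a t => rfl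
      rw [if_pos (by rw [hb, hpe]; rfl), if_pos hb]
      rw [ih (bs ++ [PySem.Str.join "\n" p]) [x] (by simp)]
      simp
    · have hb' := eq_false_of_ne_true hb
      rw [if_neg (by simp [hb']), if_neg hb]
      exact ih bs (p ++ [x]) (by simp)

-- folding pvCat is the three filters
theorem pvCat_filters (bs : List String) :
    ∀ (v w i : List String),
      bs.foldl pvCat (v, w, i) =
        (v ++ bs.filter (fun b => PySem.Str.isIn "Severity: sh:Violation" b),
         w ++ bs.filter (fun b => PySem.Str.isIn "Severity: sh:Warning" b &&
            !PySem.Str.isIn "Severity: sh:Violation" b),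
         i ++ bs.filter (fun b => PySem.Str.isIn "Severity: sh:Info" b &&
            !PySem.Str.isIn "Severity: sh:Violation" b && !PySem.Str.isIn "Severity: sh:Warning" b)) := by
  induction bs with
  | nil => intro v w i; simp
  | cons b bs ih =>
    intro v w i
    simp only [List.foldl_cons, pvCat, List.filter_cons, ih]
    split_ifs
    all_goals simp_all

-- the enumerate-filter-map cut list is pvCutsI
theorem pvCuts_enum (xs : List String) :
    ∀ (k : Nat),
      ((PySem.List.enumerate xs (((k : Nat) : Int) + 1)).filter
          (fun p => decide ((0 : Int) < p.1) && pvIsB p.2)).map Prod.fst =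
        pvCutsI (k + 1) xs := by
  induction xs with
  | nil => intro k; simp [PySem.List.enumerate_nil, pvCutsI]
  | cons x xs ih =>
    intro k
    rw [PySem.List.enumerate_cons]
    simp only [List.filter_cons, pvCutsI]
    have hpos : decide ((0 : Int) < (k : Int) + 1) = true := by simp
    have hshift : ((k : Int) + 1 + 1) = (((k + 1 : Nat) : Int) + 1) := by push_cast; ring
    by_cases hb : pvIsB x = true
    · rw [if_pos (by rw [hpos, hb]; rfl), if_pos hb]
      simp only [List.map_cons]
      rw [hshift, ih (k + 1)]
      push_cast
      ring_nf
    · have hb' := eq_false_of_ne_true hb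
      rw [if_neg (by simp [hb']), if_neg hb]
      rw [hshift, ih (k + 1)]

-- the slice between consecutive bounds is the corresponding segment
theorem pvSlices_segs (xs : List String) :
    ∀ (p pre : List String) (k : Nat), pre.length = k →
      ((((k : Nat) : Int) :: pvCutsI (k + p.length) xs ++ [((k + p.length + xs.length : Nat) : Int)]).zip
          (pvCutsI (k + p.length) xs ++ [((k + p.length + xs.length : Nat) : Int)])).map
        (fun ab => PySem.Str.join "\n" (PySem.List.slice (pre ++ p ++ xs) (some ab.1) (some ab.2))) =
      (pvSegs xs p).map (PySem.Str.join "\n") := by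
  induction xs with
  | nil =>
    intro p pre k hk
    simp only [pvCutsI, List.length_nil, Nat.add_zero, List.append_nil, List.nil_append,
      List.zip_cons_cons, List.zip_nil_right, List.map_cons, List.map_nil, pvSegs,
      List.cons_append]
    have hsl : PySem.List.slice (pre ++ p) (some ((k : Nat) : Int))
        (some ((k + p.length : Nat) : Int)) = p := by
      rw [PySem.List.slice_natCast, ← hk, List.drop_left, Nat.add_sub_cancel_left]
      exact List.take_length
    rw [hsl]
  | cons x xs ih =>
    intro p pre k hk
    have hsl : PySem.List.slice (pre ++ p ++ (x :: xs)) (some ((k : Nat) : Int))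
        (some ((k + p.length : Nat) : Int)) = p := by
      rw [PySem.List.slice_natCast,
        show pre ++ p ++ (x :: xs) = pre ++ (p ++ (x :: xs)) from by simp,
        ← hk, List.drop_left, Nat.add_sub_cancel_left]
      exact List.take_left
    by_cases hb : pvIsB x = true
    · have hE : k + p.length + (x :: xs).length = k + p.length + 1 + xs.length := by
        simp only [List.length_cons]; omega
      rw [hE]
      simp only [pvCutsI, pvSegs, hb, if_true, List.cons_append, List.zip_cons_cons,
        List.map_cons, hsl]
      have := ih [x] (pre ++ p) (k + p.length) (by rw [List.length_append, hk])
      simp only [List.length_singleton, List.append_assoc, List.singleton_append] at this ⊢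
      exact congrArg (List.cons (PySem.Str.join "\n" p)) this
    · have hb' := eq_false_of_ne_true hb
      have hE : k + p.length + (x :: xs).length = k + (p ++ [x]).length + xs.length := by
        simp only [List.length_cons, List.length_append, List.length_nil]
        omega
      rw [hE]
      simp only [pvCutsI, pvSegs, hb', if_false, Bool.false_eq_true]
      have := ih (p ++ [x]) pre k hk
      simp only [List.length_append, List.length_singleton, List.append_assoc,
        List.singleton_append] at this ⊢
      exact this

-- the cut list of the port, started at 1
theorem pvCuts_enum1 (xs : List String) :
    ((PySem.List.enumerate xs (1 : Int)).filter
        (fun p => decide ((0 : Int) < p.1) && pvIsB p.2)).map Prod.fst = pvCutsI 1 xs := by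
  have := pvCuts_enum xs 0
  simpa using this

-- ===== VERDICT (by name: the statement is the Claim_ definition above) =====
theorem parse_validation_results_spec : Claim_equal_parse_validation_results := by
  intro s _
  unfold Spec_parse_validation_results parse_validation_results parse_validation_results_alt
  by_cases hg : (PySem.Str.len s == 0 || !PySem.Str.isIn "Validation Report" s) = true
  · rw [if_pos hg, if_pos hg]
  · rw [if_neg hg, if_neg hg]
    cases hl : (PySem.Str.split? s "\n").getD [] with
    | nil => exact absurd hl (pvLines_ne s)
    | cons l ls =>
      have hinv := pvLoop_inv (l :: ls) [] []
      simp only [List.foldl_nil] at hinv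
      simp only [hinv]
      have hstep : (l :: ls).foldl pvStepB ([], []) = ls.foldl pvStepB ([], [l]) := by
        simp [pvStepB]
      rw [hstep]
      set st := ls.foldl pvStepB ([], [l]) with hst
      have hne : st.2 ≠ [] := pvFoldB_snd_ne ls ([], [l]) (by simp)
      simp only [if_neg (by simpa using hne : ¬ st.2.isEmpty = true)]
      trans ((st.1 ++ [PySem.Str.join "\n" st.2]).foldl pvCat ([], [], []))
      · simp only [List.foldl_append, List.foldl_cons, List.foldl_nil, pvCat]
      · have hblocks : st.1 ++ [PySem.Str.join "\n" st.2] =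
            (pvSegs ls [l]).map (PySem.Str.join "\n") := by
          rw [hst]; simpa using pvFoldB_blocks ls [] [l] (by simp)
        rw [hblocks, pvCat_filters]
        simp only [List.nil_append]
        have henum : ((PySem.List.enumerate (l :: ls) 0).filter
            (fun p => decide ((0 : Int) < p.1) && pvIsB p.2)).map Prod.fst = pvCutsI 1 ls := by
          rw [PySem.List.enumerate_cons]
          rw [List.filter_cons_of_neg (by simp)]
          rw [show (0 : Int) + 1 = 1 from by norm_num]
          exact pvCuts_enum1 ls
        rw [henum, PySem.List.slice_from_one]
        simp only [List.length_cons]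
        rw [show (((0 : Int) :: pvCutsI 1 ls ++ [((ls.length + 1 : Nat) : Int)]).tail) =
          pvCutsI 1 ls ++ [((ls.length + 1 : Nat) : Int)] from rfl]
        have hb2 := pvSlices_segs ls [l] [] 0 rfl
        simp only [List.nil_append, List.singleton_append, List.length_singleton, Nat.zero_add,
          Nat.cast_zero] at hb2
        rw [Nat.add_comm 1 ls.length] at hb2
        rw [hb2]
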